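-- pv_equiv track=rewrite | github.com/DamienRabier/SAE_Crypto | Dechiffrement/dechiffrement_vigenere.py | texte_par_portion
-- ===== SOURCE A (Python) =====
-- ALPHABET = "ABCDEFGHIJKLMNOPQRSTUVWXYZ"
--
-- def enlever_caractere_non_dico(texte):
--     """Fonction qui permet d'enlever les caractères non présents dans l'alphabet
--
--     Args:
--         texte (String): Texte à traiter
--
--     Returns:
--         String : Texte sans caractères non présents dans l'alphabet
--     """
--     texte = texte.upper()
--     for mot in texte:
--         if mot not in ALPHABET:
--             texte = texte.replace(mot, "") # On remplace les caractères non présents dans l'alphabet par des espaces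
--     return texte
--
-- def texte_par_portion(texte,portion):
--     """ Fonction qui permet de découper un texte en plusieurs parties
--
--     Args:
--         texte (String): Texte à découper
--         portion (int): Nombre de parties dans lesquelles on découpe le texte
--
--     Returns:
--         list: Liste contenant les parties du texte
--     """
--     texte = enlever_caractere_non_dico(texte)
--     resultat = []
--     for i in range(portion): # On parcourt le nombre de parties
--         resultat.append("") # On ajoute une partie au résultat
--     for i in range(len(texte)): # On parcourt le texte
--         resultat[i % portion] += texte[i] # On ajoute le caractère à la partie correspondante
--     return resultat
-- ===== SOURCE B (Python) =====
-- ALPHABET = "ABCDEFGHIJKLMNOPQRSTUVWXYZ"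
--
-- def texte_par_portion(texte, portion):
--     t = ''.join(c for c in texte.upper() if c in ALPHABET)
--     resultat = []
--     for i in range(portion):
--         bucket = []
--         k = i
--         while k < len(t):
--             bucket.append(t[k])
--             k += portion
--         resultat.append(''.join(bucket))
--     return resultat
-- ===== Notes on version B (the rewrite author's own statement) =====
-- stated objective: alternative
-- what changed: Filtering is a single join-of-comprehension instead of repeated str.replace passes, and the round-robin distribution is rebuilt bucket-by-bucket with a strided index walk (one pass per residue class) instead of one mod-indexed pass mutating a pre-allocated list.
import Mathlib
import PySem

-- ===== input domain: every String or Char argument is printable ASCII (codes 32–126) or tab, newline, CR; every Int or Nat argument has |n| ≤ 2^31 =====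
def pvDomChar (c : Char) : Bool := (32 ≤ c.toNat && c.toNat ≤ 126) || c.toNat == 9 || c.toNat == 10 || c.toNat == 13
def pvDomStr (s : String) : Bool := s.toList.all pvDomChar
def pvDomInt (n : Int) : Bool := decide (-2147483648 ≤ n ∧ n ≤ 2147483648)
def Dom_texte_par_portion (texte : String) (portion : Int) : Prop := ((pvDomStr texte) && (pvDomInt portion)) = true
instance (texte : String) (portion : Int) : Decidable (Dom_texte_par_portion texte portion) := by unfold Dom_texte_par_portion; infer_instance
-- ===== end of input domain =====

-- B replaces A's repeated str.replace filtering by one filter pass and A's single mod-indexed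
-- distribution loop by one strided index walk per bucket (alternative decomposition, same results).


def pvAlphabet : String := "ABCDEFGHIJKLMNOPQRSTUVWXYZ"

-- ===== PORT A =====
def enlever_caractere_non_dico (texte : String) : String :=
  let t := PySem.Str.upper texte
  t.toList.foldl (fun acc mot =>
    if PySem.Str.isIn (String.ofList [mot]) pvAlphabet then acc
    else PySem.Str.replace acc (String.ofList [mot]) "") t

def texte_par_portion (texte : String) (portion : Int) : List String :=
  let t := enlever_caractere_non_dico texte
  let resultat := (PySem.List.pyRange 0 portion 1).foldl (fun acc _ => acc ++ [""]) []
  (PySem.List.pyRange 0 (PySem.Str.len t) 1).foldl (fun acc i =>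
    match PySem.Str.pyGet? t i with
    | some c =>
        PySem.List.pySetD acc (PySem.Int.mod i portion)
          ((PySem.List.pyGetD acc (PySem.Int.mod i portion) "").push c)
    | none => acc) resultat

-- ===== PORT B =====
-- the while loop 'k < len(t): bucket.append(t[k]); k += portion' (0 < portion is the totality guard)
def pvGather (t : List Char) (portion : Int) (k : Int) : List Char :=
  if _h : 0 < portion ∧ k < (t.length : Int) then
    PySem.List.pyGetD t k ' ' :: pvGather t portion (k + portion)
  else []
termination_by ((t.length : Int) - k).toNat
decreasing_by omega

def texte_par_portion_alt (texte : String) (portion : Int) : List String :=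
  let t := String.ofList
    (((PySem.Str.upper texte).toList).filter (fun c => PySem.Str.isIn (String.ofList [c]) pvAlphabet))
  (PySem.List.pyRange 0 portion 1).map (fun i => String.ofList (pvGather t.toList portion i))

-- ===== PRECONDITION & SPEC =====
-- Pre_ excludes exactly the inputs where A raises: portion <= 0 together with a text that still
-- holds an alphabet letter after upper-casing (there A hits 'i % portion' with portion <= 0).
def Pre_texte_par_portion (texte : String) (portion : Int) : Prop :=
  0 < portion ∨ (texte.toList.all (fun c => !(pvAlphabet.toList.contains (PySem.Chars.upperChar c)))) = true
instance (texte : String) (portion : Int) : Decidable (Pre_texte_par_portion texte portion) := by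
  unfold Pre_texte_par_portion; infer_instance

def pvWitness_texte_par_portion : String × Int := ("Hello, World!", 3)

def Spec_texte_par_portion (texte : String) (portion : Int) (out : List String) : Prop :=
  out = texte_par_portion_alt texte portion
instance (texte : String) (portion : Int) (out : List String) : Decidable (Spec_texte_par_portion texte portion out) := by
  unfold Spec_texte_par_portion; infer_instance

-- ===== CLAIM (what is proved, stated in full; the proofs are below) =====
def Claim_equal_texte_par_portion : Prop := ∀ (texte : String) (portion : Int), Dom_texte_par_portion texte portion → Pre_texte_par_portion texte portion → Spec_texte_par_portion texte portion (texte_par_portion texte portion)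

-- ===== LEMMAS AND PROOFS =====

theorem pv_replace_go_filter (c : Char) : ∀ (fuel : Nat) (l acc : List Char), l.length ≤ fuel →
    PySem.Chars.replace.go [c] [] fuel l acc = acc.reverse ++ l.filter (fun x => x ≠ c) := by
  intro fuel
  induction fuel with
  | zero =>
    intro l acc h
    have : l = [] := List.eq_nil_of_length_eq_zero (Nat.le_zero.mp h)
    subst this; simp [PySem.Chars.replace.go]
  | succ n ih =>
    intro l acc h
    cases l with
    | nil => simp [PySem.Chars.replace.go]
    | cons x t =>
      by_cases hx : x = c
      · subst hx
        have hpre : List.isPrefixOf [x] (x :: t) = true := by simp [List.isPrefixOf]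
        rw [PySem.Chars.replace.go]
        simp only [hpre, if_pos]
        simpa using ih t acc (by simpa using Nat.le_of_succ_le_succ h)
      · have hpre : List.isPrefixOf [c] (x :: t) = false := by
          simp [List.isPrefixOf]; exact fun hc => absurd hc.symm hx
        rw [PySem.Chars.replace.go]
        simp only [hpre]
        rw [ih t (x :: acc) (by simpa using Nat.le_of_succ_le_succ h)]
        simp [hx]

theorem pv_replace_filter (l : List Char) (c : Char) :
    PySem.Chars.replace l [c] [] = l.filter (fun x => x ≠ c) := by
  rw [PySem.Chars.replace]
  simp [pv_replace_go_filter c l.length l [] le_rfl]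

theorem pv_isIn_singleton (c : Char) (s : String) :
    PySem.Str.isIn (String.ofList [c]) s = s.toList.contains c := by
  rcases h : PySem.Str.isIn (String.ofList [c]) s with _ | _
  · have := (PySem.Str.isIn_iff_infix (String.ofList [c]) s)
    rw [h] at this
    simp only [String.toList_ofList] at this
    symm
    simp only [List.contains_eq_mem, decide_eq_false_iff_not]
    intro hm
    have h2 := (List.singleton_infix_iff c s.toList).mpr hm
    rw [(PySem.Str.isIn_iff_infix (String.ofList [c]) s).mpr (by simpa using h2)] at h
    exact Bool.noConfusion h
  · have := (PySem.Str.isIn_iff_infix (String.ofList [c]) s).mp h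
    simp only [String.toList_ofList] at this
    have := (List.singleton_infix_iff c s.toList).mp this
    simp [List.contains_eq_mem, this]

theorem pv_enlever_fold (m : List Char) : ∀ (t : String),
    (m.foldl (fun acc mot =>
      if PySem.Str.isIn (String.ofList [mot]) pvAlphabet then acc
      else PySem.Str.replace acc (String.ofList [mot]) "") t).toList
    = t.toList.filter (fun x => pvAlphabet.toList.contains x || !(m.contains x)) := by
  induction m with
  | nil => intro t; simp
  | cons mot m' ih =>
    intro t
    simp only [List.foldl_cons]
    by_cases hA : mot ∈ pvAlphabet.toList
    · rw [if_pos (by rw [pv_isIn_singleton]; simpa [List.contains_eq_mem] using hA), ih]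
      apply List.filter_congr
      intro x _
      by_cases h1 : x ∈ pvAlphabet.toList
      · simp [List.contains_eq_mem, h1]
      · have h2 : x ≠ mot := fun he => h1 (he ▸ hA)
        simp [List.contains_eq_mem, h1, h2]
    · rw [if_neg (by rw [pv_isIn_singleton]; simpa [List.contains_eq_mem] using hA), ih]
      have hrep : (PySem.Str.replace t (String.ofList [mot]) "").toList
          = t.toList.filter (fun x => x ≠ mot) := by
        rw [PySem.Str.toList_replace]
        simp only [String.toList_ofList]
        have h0 : ("" : String).toList = [] := rfl
        rw [h0, pv_replace_filter]
      rw [hrep, List.filter_filter]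
      apply List.filter_congr
      intro x _
      by_cases h1 : x ∈ pvAlphabet.toList
      · have h2 : x ≠ mot := fun he => hA (he ▸ h1)
        simp [List.contains_eq_mem, h1, h2]
      · by_cases h2 : x = mot
        · subst h2; simp [List.contains_eq_mem, h1]
        · simp [List.contains_eq_mem, h1, h2]

theorem pv_enlever_toList (texte : String) :
    (enlever_caractere_non_dico texte).toList
    = ((PySem.Str.upper texte).toList).filter (fun c => PySem.Str.isIn (String.ofList [c]) pvAlphabet) := by
  unfold enlever_caractere_non_dico
  rw [pv_enlever_fold]
  apply List.filter_congr
  intro x hx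
  rw [pv_isIn_singleton]
  simp only [PySem.Str.toList_upper] at hx ⊢
  simp [List.contains_eq_mem, hx]

theorem pv_init_fold (xs : List Int) : ∀ (acc : List String),
    xs.foldl (fun a (_ : Int) => a ++ [""]) acc = acc ++ List.replicate xs.length "" := by
  induction xs with
  | nil => intro acc; simp
  | cons x xs ih =>
    intro acc
    simp only [List.foldl_cons, List.length_cons, ih, List.replicate_succ]
    simp

theorem pv_gather_stop (t : List Char) (p k : Int) (h : (t.length : Int) ≤ k) :
    pvGather t p k = [] := by
  rw [pvGather]; rw [dif_neg]; omega

theorem pv_gather_last (p : Int) (hp : 0 < p) (c : Char) (m : List Char) :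
    pvGather (m ++ [c]) p (m.length : Int) = [c] := by
  rw [pvGather, dif_pos ⟨hp, by simp⟩]
  rw [pv_gather_stop _ _ _ (by simp; omega)]
  congr 1
  rw [PySem.List.pyGetD_eq_getElem _ _ (by omega) (by simp)]
  simp

theorem pv_gather_append (p : Int) (hp : 0 < p) (c : Char) (m : List Char) :
    ∀ (d : Nat) (k : Int), 0 ≤ k → (m.length : Int) - k ≤ (d : Int) →
    pvGather (m ++ [c]) p k =
      pvGather m p k ++ (if k ≤ (m.length : Int) ∧ p ∣ ((m.length : Int) - k) then [c] else []) := by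
  intro d
  induction d with
  | zero =>
    intro k hk hd
    have hlen : (m.length : Int) ≤ k := by omega
    rcases eq_or_lt_of_le hlen with heq | hlt
    · rw [← heq, pv_gather_last p hp c m, pv_gather_stop m p _ le_rfl,
        if_pos ⟨le_rfl, by simp⟩]
      rfl
    · rw [pv_gather_stop _ _ _ (by simp; omega), pv_gather_stop m p _ (by omega),
        if_neg (by omega)]
      rfl
  | succ n ih =>
    intro k hk hd
    rcases lt_trichotomy k (m.length : Int) with hlt | heq | hgt
    · have hcond : (k ≤ (m.length : Int) ∧ p ∣ ((m.length : Int) - k)) ↔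
          (k + p ≤ (m.length : Int) ∧ p ∣ ((m.length : Int) - (k + p))) := by
        constructor
        · rintro ⟨h1, h2⟩
          have hpos : 0 < (m.length : Int) - k := by omega
          have hle := Int.le_of_dvd hpos h2
          refine ⟨by omega, ?_⟩
          have hd2 := dvd_sub h2 (dvd_refl p)
          have he : (m.length : Int) - k - p = (m.length : Int) - (k + p) := by ring
          rwa [he] at hd2
        · rintro ⟨h1, h2⟩
          refine ⟨by omega, ?_⟩
          have hd2 := dvd_add h2 (dvd_refl p)
          have he : (m.length : Int) - (k + p) + p = (m.length : Int) - k := by ring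
          rwa [he] at hd2
      have hget : PySem.List.pyGetD (m ++ [c]) k ' ' = PySem.List.pyGetD m k ' ' := by
        rw [PySem.List.pyGetD_eq_getElem _ _ hk (by simp; omega),
          PySem.List.pyGetD_eq_getElem _ _ hk (by omega)]
        rw [List.getElem_append_left (by omega)]
      conv_rhs => rw [pvGather, dif_pos ⟨hp, hlt⟩]
      conv_lhs => rw [pvGather, dif_pos ⟨hp, (by simp; omega : k < ((m ++ [c]).length : Int))⟩]
      rw [ih (k + p) (by omega) (by omega)]
      rw [if_congr hcond rfl rfl, hget]
      simp
    · subst heq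
      rw [ pv_gather_last p hp c m, pv_gather_stop m p _ le_rfl,
        if_pos ⟨le_rfl, by simp⟩]
      rfl
    · rw [pv_gather_stop _ _ _ (by simp; omega), pv_gather_stop m p _ (by omega),
        if_neg (by omega)]
      rfl

theorem pv_push_ofList (xs : List Char) (c : Char) :
    (String.ofList xs).push c = String.ofList (xs ++ [c]) := by
  have h : ((String.ofList xs).push c).toList = (String.ofList (xs ++ [c])).toList := by
    simp [String.toList_push, String.toList_ofList]
  exact String.toList_inj.mp h

theorem pv_invariant (t : String) (q : Nat) (hq : 0 < q) : ∀ (n : Nat), n ≤ t.toList.length →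
    ((List.range n).map (fun (k : Nat) => (k : Int))).foldl (fun acc i =>
      match PySem.Str.pyGet? t i with
      | some c =>
          PySem.List.pySetD acc (PySem.Int.mod i (q : Int))
            ((PySem.List.pyGetD acc (PySem.Int.mod i (q : Int)) "").push c)
      | none => acc) (List.replicate q "")
    = (List.range q).map (fun (j : Nat) => String.ofList (pvGather (t.toList.take n) (q : Int) (j : Int))) := by
  intro n
  induction n with
  | zero =>
    intro _
    simp only [List.range_zero, List.map_nil, List.foldl_nil, List.take_zero]
    have h1 : ∀ j ∈ List.range q,
        String.ofList (pvGather ([] : List Char) (q : Int) (j : Int)) = "" := by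
      intro j _
      rw [pv_gather_stop _ _ _ (by simp)]
    rw [List.map_congr_left h1, List.map_const']
    simp
  | succ n ih =>
    intro hn
    have hnlt : n < t.toList.length := by omega
    have hc : PySem.Str.pyGet? t (n : Int) = some (t.toList[n]) := by
      rw [PySem.Str.pyGet?_natCast]
      exact List.getElem?_eq_getElem hnlt
    set c := t.toList[n] with hcdef
    rw [List.range_succ, List.map_append, List.foldl_append]
    rw [ih (by omega)]
    simp only [List.map_cons, List.map_nil, List.foldl_cons, List.foldl_nil, hc]
    have hmod : PySem.Int.mod (n : Int) (q : Int) = ((n % q : Nat) : Int) :=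
      PySem.Int.mod_natCast n q
    rw [hmod, PySem.List.pySetD_natCast, PySem.List.pyGetD_natCast]
    have hmq : n % q < q := Nat.mod_lt n hq
    have hget : (List.map (fun (j : Nat) => String.ofList (pvGather (t.toList.take n) (q : Int) (j : Int)))
        (List.range q)).getD (n % q) ""
        = String.ofList (pvGather (t.toList.take n) (q : Int) ((n % q : Nat) : Int)) := by
      rw [List.getD_eq_getElem?_getD, List.getElem?_map, List.getElem?_range hmq]
      rfl
    rw [hget]
    have htake : t.toList.take (n + 1) = t.toList.take n ++ [c] := by
      rw [List.take_add_one]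
      rw [List.getElem?_eq_getElem hnlt]
      rfl
    have hlen : (t.toList.take n).length = n := List.length_take_of_le (by omega)
    apply List.ext_getElem
    · simp
    · intro j hj1 hj2
      simp only [List.length_set, List.length_map, List.length_range] at hj1
      rw [List.getElem_set]
      simp only [List.getElem_map, List.getElem_range]
      by_cases hjm : n % q = j
      · rw [if_pos hjm, htake, ← hjm]
        rw [pv_gather_append (q : Int) (by exact_mod_cast hq) c _ n ((n % q : Nat) : Int)
          (by omega) (by rw [hlen]; push_cast; omega)]
        rw [if_pos ?_, pv_push_ofList]
        constructor
        · rw [hlen]; exact_mod_cast Nat.mod_le n q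
        · rw [hlen]
          have hsub : n - n % q = q * (n / q) := by
            conv_lhs => rw [← Nat.div_add_mod n q]
            simp [Nat.add_sub_cancel]
          have : ((n : Int) - ((n % q : Nat) : Int)) = ((n - n % q : Nat) : Int) := by
            push_cast [Nat.cast_sub (Nat.mod_le n q)]; ring
          rw [this, hsub]
          exact_mod_cast Dvd.intro (n / q) rfl
      · rw [if_neg hjm, htake]
        rw [pv_gather_append (q : Int) (by exact_mod_cast hq) c _ n ((j : Nat) : Int)
          (by omega) (by rw [hlen]; push_cast; omega)]
        rw [if_neg ?_, List.append_nil]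
        rw [hlen]
        rintro ⟨h1, h2⟩
        have hjn : j ≤ n := by exact_mod_cast h1
        have h2' : (q : Int) ∣ ((n - j : Nat) : Int) := by
          rw [Nat.cast_sub hjn]; exact h2
        have h2n : q ∣ (n - j) := by exact_mod_cast h2'
        obtain ⟨a, ha⟩ := h2n
        have hna : n = j + q * a := by omega
        have hmm : n % q = j % q := by rw [hna, Nat.add_mul_mod_self_left]
        have hjq : j % q = j := Nat.mod_eq_of_lt (by simpa using hj2)
        exact hjm (hmm.trans hjq)

theorem pv_main (texte : String) (portion : Int) (hpre : Pre_texte_par_portion texte portion) :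
    texte_par_portion texte portion = texte_par_portion_alt texte portion := by
  simp only [texte_par_portion, texte_par_portion_alt]
  by_cases hpos : 0 < portion
  · -- general positive-portion case
    set t := enlever_caractere_non_dico texte with ht
    have htl : (String.ofList
        (((PySem.Str.upper texte).toList).filter (fun c => PySem.Str.isIn (String.ofList [c]) pvAlphabet))).toList
        = t.toList := by
      rw [String.toList_ofList, pv_enlever_toList]
    set q := portion.toNat with hqdef
    have hq : 0 < q := by omega
    have hportion : portion = (q : Int) := by omega
    have hinit : (PySem.List.pyRange 0 portion 1).foldl (fun acc _ => acc ++ [""]) ([] : List String)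
        = List.replicate q "" := by
      rw [pv_init_fold]
      rw [List.nil_append, PySem.List.length_pyRange_one]
      have h0 : (portion - 0).toNat = q := by omega
      rw [h0]
    rw [hinit]
    have hlen : PySem.Str.len t = ((t.toList.length : Nat) : Int) := PySem.Str.len_eq t
    rw [hlen, PySem.List.pyRange_zero_nat]
    rw [hportion]
    rw [pv_invariant t q hq t.toList.length le_rfl]
    rw [List.take_length]
    rw [PySem.List.pyRange_zero_nat, List.map_map]
    rw [htl]
    rfl
  · -- portion ≤ 0: Pre_ forces the filtered text to be empty
    have hall : (texte.toList.all (fun c => !(pvAlphabet.toList.contains (PySem.Chars.upperChar c)))) = true := by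
      rcases hpre with h | h
      · exact absurd h hpos
      · exact h
    have hempty : ((PySem.Str.upper texte).toList).filter
        (fun c => PySem.Str.isIn (String.ofList [c]) pvAlphabet) = [] := by
      rw [List.filter_eq_nil_iff]
      intro c hc
      rw [PySem.Str.toList_upper] at hc
      unfold PySem.Chars.upper at hc
      obtain ⟨x, hx, hxc⟩ := List.mem_map.mp hc
      have := List.all_eq_true.mp hall x hx
      rw [pv_isIn_singleton]
      subst hxc
      simpa using this
    have htl0 : (enlever_caractere_non_dico texte).toList = [] := by
      rw [pv_enlever_toList, hempty]
    have hrange : PySem.List.pyRange 0 portion 1 = [] :=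
      PySem.List.pyRange_one_eq_nil (by omega)
    rw [hrange]
    simp only [List.foldl_nil, List.map_nil]
    have hlen0 : PySem.Str.len (enlever_caractere_non_dico texte) = 0 := by
      rw [PySem.Str.len_eq, htl0]
      rfl
    rw [hlen0]
    rw [PySem.List.pyRange_one_eq_nil le_rfl]
    rfl

-- ===== VERDICT (by name: the statement is the Claim_ definition above) =====
theorem texte_par_portion_spec : Claim_equal_texte_par_portion := by
  intro texte portion _ hpre
  unfold Spec_texte_par_portion
  exact pv_main texte portion hpre
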